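-- pv_equiv track=rewrite | github.com/MatheusSanches02/Logica-Python | Matriz(lista de lista)/Ex9.py | preencher_matriz
-- ===== SOURCE A (Python) =====
-- def preencher_matriz(matriz,tam1,tam2):
--
--     for i in range(tam1):
--
--         linha = []
--
--         for j in range(tam2):
--             if(j%2==0): #estou falando das colunas 0,2 e 4
--                  linha.append(0)
--             else: #estou falando das colunas 1 e 3
--                  linha.append(1)
--
--         matriz.append(linha)
--
--     return matriz
-- ===== SOURCE B (Python) =====
-- def preencher_matriz(matriz, tam1, tam2):
--     # Build the alternating 0/1 row once, then append a fresh copy per row.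
--     if tam1 > 0:
--         linha_base = [j % 2 for j in range(tam2)]
--         matriz += [list(linha_base) for _ in range(tam1)]
--     return matriz
-- ===== Notes on version B (the rewrite author's own statement) =====
-- stated objective: simpler
-- what changed: B computes the alternating 0/1 row once as a template (j % 2) and replicates fresh copies of it per row, instead of A's nested per-cell loop with an if/else.
import Mathlib
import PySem

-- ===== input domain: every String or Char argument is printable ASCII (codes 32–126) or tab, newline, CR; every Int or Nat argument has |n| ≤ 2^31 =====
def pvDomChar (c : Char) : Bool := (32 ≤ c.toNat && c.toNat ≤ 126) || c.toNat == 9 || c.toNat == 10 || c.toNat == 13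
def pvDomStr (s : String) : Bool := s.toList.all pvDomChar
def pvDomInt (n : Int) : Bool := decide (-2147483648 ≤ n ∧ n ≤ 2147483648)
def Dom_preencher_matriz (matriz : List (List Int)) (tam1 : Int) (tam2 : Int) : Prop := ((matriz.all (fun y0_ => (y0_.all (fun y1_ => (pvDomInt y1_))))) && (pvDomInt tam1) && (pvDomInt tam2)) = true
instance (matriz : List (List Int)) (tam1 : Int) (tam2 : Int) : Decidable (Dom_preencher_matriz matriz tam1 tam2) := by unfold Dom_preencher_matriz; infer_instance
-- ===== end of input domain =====

-- ===== PORT A =====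
-- Port of A: for each i in range(tam1), build a row cell by cell (append 0 on even j, 1 on odd j), append it to matriz.
def preencher_matriz (matriz : List (List Int)) (tam1 : Int) (tam2 : Int) : List (List Int) :=
  (PySem.List.pyRange 0 tam1 1).foldl
    (fun m _ =>
      m ++ [(PySem.List.pyRange 0 tam2 1).foldl
              (fun linha j => if PySem.Int.mod j 2 == 0 then linha ++ [(0 : Int)] else linha ++ [(1 : Int)]) []])
    matriz

-- ===== PORT B =====
-- B (one honest line): build the alternating row once as a template (j % 2) and append one copy per row — a
-- compute-once-then-replicate decomposition, simpler than A's per-cell if/else. Return-value equivalence only: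
-- both Pythons mutate `matriz` in place in the same way.
def preencher_matriz_alt (matriz : List (List Int)) (tam1 : Int) (tam2 : Int) : List (List Int) :=
  if tam1 > 0 then
    let linha_base := (PySem.List.pyRange 0 tam2 1).map (fun j => PySem.Int.mod j 2)
    matriz ++ (PySem.List.pyRange 0 tam1 1).map (fun _ => linha_base)
  else matriz

-- ===== PRECONDITION & SPEC =====
def Spec_preencher_matriz (matriz : List (List Int)) (tam1 : Int) (tam2 : Int) (out : List (List Int)) : Prop := out = preencher_matriz_alt matriz tam1 tam2
instance (matriz : List (List Int)) (tam1 : Int) (tam2 : Int) (out : List (List Int)) : Decidable (Spec_preencher_matriz matriz tam1 tam2 out) := by unfold Spec_preencher_matriz; infer_instance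

-- ===== CLAIM (what is proved, stated in full; the proofs are below) =====
def Claim_equal_preencher_matriz : Prop := ∀ (matriz : List (List Int)) (tam1 : Int) (tam2 : Int), Dom_preencher_matriz matriz tam1 tam2 → Spec_preencher_matriz matriz tam1 tam2 (preencher_matriz matriz tam1 tam2)

-- ===== LEMMAS AND PROOFS =====

-- A's inner loop, started from any accumulator, appends exactly the j % 2 values of the range.
theorem inner_foldl_eq_map (rs : List Int) (acc : List Int) :
    rs.foldl (fun linha j => if PySem.Int.mod j 2 == 0 then linha ++ [(0 : Int)] else linha ++ [(1 : Int)]) acc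
      = acc ++ rs.map (fun j => PySem.Int.mod j 2) := by
  induction rs generalizing acc with
  | nil => simp
  | cons j rs ih =>
    simp only [List.foldl_cons, List.map_cons, ih]
    have h01 : (if PySem.Int.mod j 2 == 0 then acc ++ [(0 : Int)] else acc ++ [(1 : Int)])
        = acc ++ [PySem.Int.mod j 2] := by
      have h0 : (0 : Int) ≤ PySem.Int.mod j 2 := PySem.Int.mod_nonneg j (by norm_num)
      have h2 : PySem.Int.mod j 2 < 2 := PySem.Int.mod_lt j (by norm_num)
      by_cases h : PySem.Int.mod j 2 = 0
      · rw [h]; simp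
      · have h1 : PySem.Int.mod j 2 = 1 := by omega
        rw [h1]; simp
    rw [h01, List.append_assoc]; simp

-- A's outer loop appends one copy of a fixed row per range element.
theorem outer_foldl_eq_append (rs : List Int) (row : List Int) (m : List (List Int)) :
    rs.foldl (fun m _ => m ++ [row]) m = m ++ rs.map (fun _ => row) := by
  induction rs generalizing m with
  | nil => simp
  | cons i rs ih => simp [ih, List.append_assoc]

-- ===== VERDICT (by name: the statement is the Claim_ definition above) =====
theorem preencher_matriz_spec : Claim_equal_preencher_matriz := by
  intro matriz tam1 tam2 _
  unfold Spec_preencher_matriz preencher_matriz preencher_matriz_alt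
  rw [inner_foldl_eq_map, outer_foldl_eq_append]
  by_cases h : tam1 > 0
  · simp [h]
  · simp [h, PySem.List.pyRange_one_eq_nil (by omega : tam1 ≤ 0)]
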